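-- pv_equiv track=rewrite | github.com/reisenx/2110101-COM-PROG | GE-Grader-Examination/G6701-Exam-2567-S1/Grader-02-Survey/2567_1_Q2_B2-S/2567_1_Q2_B2-S.py | hide_word
-- ===== SOURCE A (Python) =====
-- def hide_word(word):
--     result = ""
--     for i in range(len(word)):
--         if i % 2 == 0:
--             result += word[i]
--         else:
--             result += "*"
--     return result
-- ===== SOURCE B (Python) =====
-- def hide_word(word):
--     chars = list(word)
--     for i in range(1, len(word), 2):
--         chars[i] = "*"
--     return "".join(chars)
-- ===== Notes on version B (the rewrite author's own statement) =====
-- stated objective: simpler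
-- what changed: B builds a char array from the word once and overwrites only the odd indices via range(1, len, 2), joining at the end, instead of A's per-index loop with a parity branch accumulating a string.
import Mathlib
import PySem

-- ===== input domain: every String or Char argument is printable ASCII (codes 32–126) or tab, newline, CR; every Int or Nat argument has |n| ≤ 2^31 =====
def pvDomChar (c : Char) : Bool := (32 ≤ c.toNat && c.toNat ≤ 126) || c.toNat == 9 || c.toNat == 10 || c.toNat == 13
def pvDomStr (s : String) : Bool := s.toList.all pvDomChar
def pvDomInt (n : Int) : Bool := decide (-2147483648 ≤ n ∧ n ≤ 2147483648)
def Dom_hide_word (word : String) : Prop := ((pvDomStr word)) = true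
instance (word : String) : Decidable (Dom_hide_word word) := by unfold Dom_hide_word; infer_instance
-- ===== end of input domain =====

-- B masks odd positions by overwriting them in a char array built once (mutate-then-join
-- instead of A's per-index parity branch with string accumulation); objective: simpler.


-- ===== PORT A =====
-- result = ""; for i in range(len(word)): if i % 2 == 0: result += word[i] else: result += "*"
def hide_word (word : String) : String :=
  String.ofList <|
    (PySem.List.pyRange 0 (word.toList.length : Int) 1).foldl
      (fun result i =>
        if PySem.Int.mod i 2 = 0 then
          result ++ [PySem.List.pyGetD word.toList i ' ']
        else
          result ++ ['*'])
      []

-- ===== PORT B =====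
-- chars = list(word); for i in range(1, len(word), 2): chars[i] = "*"; return "".join(chars)
def hide_word_alt (word : String) : String :=
  String.ofList <|
    (PySem.List.pyRange 1 (word.toList.length : Int) 2).foldl
      (fun chars i => PySem.List.pySetD chars i '*')
      word.toList

-- ===== PRECONDITION & SPEC =====
def Spec_hide_word (word : String) (out : String) : Prop := out = hide_word_alt word
instance (word : String) (out : String) : Decidable (Spec_hide_word word out) := by unfold Spec_hide_word; infer_instance

-- ===== CLAIM (what is proved, stated in full; the proofs are below) =====
def Claim_equal_hide_word : Prop := ∀ (word : String), Dom_hide_word word → Spec_hide_word word (hide_word word)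

-- ===== LEMMAS AND PROOFS =====

-- Overwriting '*' at a list of Nat positions, read back elementwise.
theorem getElem?_foldl_set (is : List Nat) (cs : List Char) (j : Nat) :
    (is.foldl (fun a k => a.set k '*') cs)[j]? =
      if j ∈ is then cs[j]?.map (fun _ => '*') else cs[j]? := by
  induction is generalizing cs with
  | nil => simp
  | cons i is ih =>
    simp only [List.foldl_cons, ih, List.getElem?_set, List.mem_cons]
    by_cases hji : j = i
    · subst hji
      by_cases hlen : j < cs.length
      · simp [hlen]
      · simp [hlen]
    · by_cases hmem : j ∈ is <;> simp [hmem, hji, Ne.symm hji]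

-- A's character list, in closed form.
theorem hideA_toList (l : List Char) :
    ((PySem.List.pyRange 0 (l.length : Int) 1).foldl
      (fun result i =>
        if PySem.Int.mod i 2 = 0 then result ++ [PySem.List.pyGetD l i ' ']
        else result ++ ['*']) []) =
    (List.range l.length).map (fun k => if k % 2 = 0 then l.getD k ' ' else '*') := by
  rw [PySem.List.pyRange_zero_natCast, List.foldl_map]
  have : ∀ (acc : List Char) (k : Nat), k ∈ List.range l.length →
      (if PySem.Int.mod (k : Int) 2 = 0 then acc ++ [PySem.List.pyGetD l (k : Int) ' ']
       else acc ++ ['*']) =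
      acc ++ [if k % 2 = 0 then l.getD k ' ' else '*'] := by
    intro acc k _
    by_cases h : k % 2 = 0
    · simp [PySem.List.pyGetD_natCast, h]
      intro hc; exfalso; omega
    · simp [PySem.List.pyGetD_natCast, h]
      intro hc; exfalso; omega
  rw [PySem.List.foldl_congr_mem _ _ _ _ this, PySem.List.foldl_append_singleton_eq_map]
  simp

-- B's fold over the Int range, reduced to a fold of Nat sets.
theorem hideB_toList (l : List Char) :
    ((PySem.List.pyRange 1 (l.length : Int) 2).foldl
      (fun chars i => PySem.List.pySetD chars i '*') l) =
    ((PySem.List.pyRange 1 (l.length : Int) 2).map Int.toNat).foldl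
      (fun a k => a.set k '*') l := by
  rw [List.foldl_map]
  refine PySem.List.foldl_congr_mem _ _ _ _ ?_
  intro acc i hi
  have h1 : (1 : Int) ≤ i := ((PySem.List.mem_pyRange_iff_of_pos (by norm_num) i).1 hi).1
  exact PySem.List.pySetD_of_nonneg _ _ (by omega)

theorem mem_range_toNat (n : Nat) (j : Nat) :
    j ∈ (PySem.List.pyRange 1 (n : Int) 2).map Int.toNat ↔
      (1 ≤ j ∧ j < n ∧ j % 2 = 1) := by
  simp only [List.mem_map]
  constructor
  · rintro ⟨i, hi, rfl⟩
    obtain ⟨h1, h2, h3⟩ := (PySem.List.mem_pyRange_iff_of_pos (by norm_num) i).1 hi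
    refine ⟨by omega, by omega, ?_⟩
    omega
  · rintro ⟨h1, h2, h3⟩
    refine ⟨(j : Int), (PySem.List.mem_pyRange_iff_of_pos (by norm_num) _).2 ⟨by omega, by omega, ?_⟩, by simp⟩
    omega

theorem hide_word_eq_lists (l : List Char) :
    (List.range l.length).map (fun k => if k % 2 = 0 then l.getD k ' ' else '*') =
    ((PySem.List.pyRange 1 (l.length : Int) 2).map Int.toNat).foldl
      (fun a k => a.set k '*') l := by
  apply List.ext_getElem?
  intro j
  rw [getElem?_foldl_set]
  simp only [mem_range_toNat]
  by_cases hj : j < l.length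
  · by_cases hodd : j % 2 = 1
    · rw [if_pos ⟨by omega, hj, hodd⟩]
      simp [hj]
      intro h; exfalso; omega
    · rw [if_neg (by tauto)]
      simp [hj, (by omega : j % 2 = 0), List.getD_eq_getElem?_getD]
  · rw [if_neg (fun h => hj h.2.1)]
    simp [le_of_not_gt hj]

-- ===== VERDICT (by name: the statement is the Claim_ definition above) =====
theorem hide_word_spec : Claim_equal_hide_word := by
  intro word _
  unfold Spec_hide_word hide_word hide_word_alt
  rw [hideA_toList, hideB_toList, hide_word_eq_lists]
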